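-- pv_equiv track=rewrite | github.com/SANJITTEJA/streamlitSanskritBot | streamlit_ui/components/advanced_chanting.py | remove_vyanjana
-- ===== SOURCE A (Python) =====
-- def remove_vyanjana(lg_string: str) -> str:
--     """Remove consonants and adjust for clusters"""
--     lg = ""
--     v_count = 0
--     pos = 0
--
--     for char in lg_string:
--         if char == 'V':
--             v_count += 1
--         else:
--             if v_count >= 2 and pos >= 1:
--                 lg = lg[:-1] + 'G'
--             v_count = 0
--             lg += char
--             pos += 1
--     return lg
-- ===== SOURCE B (Python) =====
-- def remove_vyanjana(lg_string: str) -> str: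
--     """Remove consonants and adjust for clusters"""
--     # Pass 1: collect non-'V' chars with the length of the V-run preceding each
--     # (the trailing V-run is never recorded, so it is dropped, as intended).
--     chars, gaps = [], []
--     run = 0
--     for ch in lg_string:
--         if ch == 'V':
--             run += 1
--         else:
--             chars.append(ch)
--             gaps.append(run)
--             run = 0
--     # Pass 2: a char becomes 'G' when the NEXT kept char is preceded by a run of >= 2 V's.
--     return ''.join(
--         'G' if i + 1 < len(chars) and gaps[i + 1] >= 2 else c
--         for i, c in enumerate(chars)
--     )
-- ===== Notes on version B (the rewrite author's own statement) =====
-- stated objective: alternative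
-- what changed: A's single in-place scan that rewrites the last character of the growing result string is replaced by a two-pass decomposition: first collect the kept characters together with the length of the V-run preceding each, then mark a character as a cluster (letter G) exactly when the next kept character is preceded by a run of at least 2.
import Mathlib
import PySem

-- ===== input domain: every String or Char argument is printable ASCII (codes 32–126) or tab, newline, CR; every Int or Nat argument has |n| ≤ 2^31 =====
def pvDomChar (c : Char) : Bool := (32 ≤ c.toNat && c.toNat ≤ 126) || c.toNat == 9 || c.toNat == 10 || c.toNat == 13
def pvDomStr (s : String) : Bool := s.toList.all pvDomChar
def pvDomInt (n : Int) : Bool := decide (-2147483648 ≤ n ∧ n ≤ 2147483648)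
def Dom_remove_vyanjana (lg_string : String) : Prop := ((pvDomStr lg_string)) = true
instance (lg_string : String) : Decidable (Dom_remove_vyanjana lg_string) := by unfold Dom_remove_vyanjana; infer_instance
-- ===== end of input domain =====

-- B replaces A's single scan (which rewrites the already-built string's last char in place)
-- by a two-pass decomposition: collect kept chars with their preceding V-run lengths, then
-- mark cluster positions in a separate index-shaped pass; objective: alternative structure.

-- ===== PORT A =====
-- one loop step of A: 'V' counts the run; otherwise maybe rewrite lg's last char
-- ('lg[:-1]' is List.dropLast, exact also on the empty list), then append char.
def pvStepA : List Char × Int × Int → Char → List Char × Int × Int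
  | (lg, v_count, pos), c =>
    if c = 'V' then (lg, v_count + 1, pos)
    else ((if 2 ≤ v_count ∧ 1 ≤ pos then lg.dropLast ++ ['G'] else lg) ++ [c], 0, pos + 1)

def remove_vyanjana (lg_string : String) : String :=
  String.mk (lg_string.toList.foldl pvStepA ([], 0, 0)).1

-- ===== PORT B =====
-- B's pass 1: state (chars, gaps, run); a non-'V' char appends itself and its preceding run length.
def pvStepB : List Char × List Int × Int → Char → List Char × List Int × Int
  | (chars, gaps, run), c =>
    if c = 'V' then (chars, gaps, run + 1)
    else (chars ++ [c], gaps ++ [run], 0)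

-- B's pass 2 (the join over the comprehension): 'G' iff i+1 < len(chars) and gaps[i+1] >= 2.
def pvRender (chars : List Char) (gaps : List Int) : List Char :=
  (PySem.List.enumerate chars).map (fun ic =>
    if ic.1 + 1 < (chars.length : Int) ∧ 2 ≤ PySem.List.pyGetD gaps (ic.1 + 1) 0 then 'G' else ic.2)

def remove_vyanjana_alt (lg_string : String) : String :=
  let st := lg_string.toList.foldl pvStepB ([], [], 0)
  String.mk (pvRender st.1 st.2.1)

-- ===== PRECONDITION & SPEC =====
def Spec_remove_vyanjana (lg_string : String) (out : String) : Prop := out = remove_vyanjana_alt lg_string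
instance (lg_string : String) (out : String) : Decidable (Spec_remove_vyanjana lg_string out) := by unfold Spec_remove_vyanjana; infer_instance

-- ===== CLAIM (what is proved, stated in full; the proofs are below) =====
def Claim_equal_remove_vyanjana : Prop := ∀ (lg_string : String), Dom_remove_vyanjana lg_string → Spec_remove_vyanjana lg_string (remove_vyanjana lg_string)

-- ===== LEMMAS AND PROOFS =====

theorem pvRender_length (chars : List Char) (gaps : List Int) :
    (pvRender chars gaps).length = chars.length := by
  simp [pvRender, PySem.List.length_enumerate]

theorem pvRender_getElem? (chars : List Char) (gaps : List Int) (k : Nat) :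
    (pvRender chars gaps)[k]? = chars[k]?.map (fun x =>
      if ((k + 1 : Nat) : Int) < (chars.length : Int) ∧
          2 ≤ PySem.List.pyGetD gaps ((k + 1 : Nat) : Int) 0 then 'G' else x) := by
  simp [pvRender, PySem.List.getElem?_enumerate chars 0 k]
  rfl

theorem pvGapsAppend (gaps : List Int) (g : Int) (n k : Nat) (h : gaps.length = n) :
    PySem.List.pyGetD (gaps ++ [g]) ((k + 1 : Nat) : Int) 0 =
      if k + 1 < n then PySem.List.pyGetD gaps ((k + 1 : Nat) : Int) 0
      else if k + 1 = n then g else 0 := by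
  rw [PySem.List.pyGetD_natCast, PySem.List.pyGetD_natCast]
  by_cases h1 : k + 1 < n
  · rw [if_pos h1, List.getD_append gaps [g] 0 (k + 1) (by omega)]
  · rw [if_neg h1]
    by_cases h2 : k + 1 = n
    · rw [if_pos h2, List.getD_append_right gaps [g] 0 (k + 1) (by omega)]
      simp [h, h2]
    · rw [if_neg h2, List.getD_append_right gaps [g] 0 (k + 1) (by omega)]
      exact List.getD_eq_default _ _ (by simp; omega)

theorem pvRHS_G (chars : List Char) (gaps : List Int) (c : Char) (k : Nat)
    (hlt : k < chars.length) :
    (((pvRender chars gaps).dropLast ++ ['G']) ++ [c])[k]? =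
      if k + 1 < chars.length then (pvRender chars gaps)[k]? else some 'G' := by
  simp only [List.getElem?_append, List.getElem?_dropLast, List.length_append, List.length_cons,
    List.length_nil, List.length_dropLast, pvRender_length]
  split_ifs <;> first
    | rfl
    | (exfalso; omega)
    | (rw [show k - (chars.length - 1) = 0 from by omega]; rfl)

theorem pvRender_append (chars : List Char) (gaps : List Int) (c : Char) (g : Int)
    (h : gaps.length = chars.length) :
    pvRender (chars ++ [c]) (gaps ++ [g]) =
      (if 2 ≤ g ∧ 1 ≤ (chars.length : Int)
        then (pvRender chars gaps).dropLast ++ ['G'] else pvRender chars gaps) ++ [c] := by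
  apply List.ext_getElem?
  intro k
  rw [pvRender_getElem?, pvGapsAppend gaps g chars.length k h]
  rcases lt_trichotomy k chars.length with hlt | heq | hgt
  · -- k < len
    have hA : ((k + 1 : Nat) : Int) < ((chars ++ [c]).length : Int) := by
      simp only [List.length_append, List.length_cons, List.length_nil]; push_cast; omega
    have hcl : (chars ++ [c])[k]? = some chars[k] := by
      rw [List.getElem?_append, if_pos hlt, List.getElem?_eq_getElem hlt]
    rw [hcl]
    simp only [Option.map_some]
    by_cases hg : 2 ≤ g ∧ 1 ≤ (chars.length : Int)
    · simp only [if_pos hg]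
      rw [pvRHS_G chars gaps c k hlt]
      rcases Nat.lt_or_ge (k + 1) chars.length with hlt2 | hge2
      · rw [if_pos hlt2, if_pos hlt2, pvRender_getElem?, List.getElem?_eq_getElem hlt,
            Option.map_some]
        have hB : (k : Int) + 1 < ((chars).length : Int) := by omega
        by_cases hp : 2 ≤ PySem.List.pyGetD gaps ((k : Int) + 1) 0 <;>
          simp [hp, hB, hlt]
      · have hke : k + 1 = chars.length := by omega
        rw [if_neg (show ¬ (k + 1 < chars.length) from by omega), if_pos hke]
        simp [hg.1, hlt, show ¬ (k + 1 < chars.length) from by omega]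
    · simp only [if_neg hg]
      rw [List.getElem?_append]
      rw [if_pos (show k < (pvRender chars gaps).length from by rw [pvRender_length]; exact hlt)]
      rw [pvRender_getElem?, List.getElem?_eq_getElem hlt, Option.map_some]
      rcases Nat.lt_or_ge (k + 1) chars.length with hlt2 | hge2
      · rw [if_pos hlt2]
        have hB : (k : Int) + 1 < ((chars).length : Int) := by omega
        by_cases hp : 2 ≤ PySem.List.pyGetD gaps ((k : Int) + 1) 0 <;>
          simp [hp, hB, hlt]
      · have hke : k + 1 = chars.length := by omega
        have h2g : ¬ 2 ≤ g := fun h2 => hg ⟨h2, by omega⟩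
        have hB : ¬ ((k : Int) + 1 < ((chars).length : Int)) := by omega
        rw [if_neg (show ¬ (k + 1 < chars.length) from by omega), if_pos hke]
        simp [h2g, hB]
  · -- k = len : both sides are c
    have hc0 : k - chars.length = 0 := by omega
    have hcn : (chars ++ [c])[k]? = some c := by
      rw [List.getElem?_append, if_neg (by omega)]
      simp [hc0]
    rw [hcn]
    simp only [Option.map_some]
    have hnc : ¬ (((k + 1 : Nat) : Int) < ((chars ++ [c]).length : Int)) := by
      simp only [List.length_append, List.length_cons, List.length_nil]; push_cast; omega
    rw [if_neg (fun hh => hnc hh.1)]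
    by_cases hg : 2 ≤ g ∧ 1 ≤ (chars.length : Int)
    · have h1g : 1 ≤ chars.length := by exact_mod_cast hg.2
      simp only [if_pos hg]
      rw [List.getElem?_append, if_neg (by simp [pvRender_length]; omega)]
      simp only [List.length_append, List.length_cons, List.length_nil, List.length_dropLast]
      rw [show k - ((pvRender chars gaps).length - 1 + 1) = 0 from by
        have hr := pvRender_length chars gaps; omega]
      simp
    · simp only [if_neg hg]
      rw [List.getElem?_append, if_neg (by simp [pvRender_length]; omega)]
      rw [show k - (pvRender chars gaps).length = 0 from by
        have hr := pvRender_length chars gaps; omega]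
      simp
  · -- past the end : both none
    have hcn : (chars ++ [c])[k]? = none := List.getElem?_eq_none (by simp; omega)
    rw [hcn, Option.map_none]
    by_cases hg : 2 ≤ g ∧ 1 ≤ (chars.length : Int)
    · have h1g : 1 ≤ chars.length := by exact_mod_cast hg.2
      simp only [if_pos hg]
      exact (List.getElem?_eq_none (by simp [pvRender_length]; omega)).symm
    · simp only [if_neg hg]
      exact (List.getElem?_eq_none (by simp [pvRender_length]; omega)).symm

-- loop invariant: A's state is (render of B's state, same run counter, number of kept chars)
theorem pvLoop (l : List Char) : ∀ (chars : List Char) (gaps : List Int) (cnt : Int),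
    gaps.length = chars.length →
    (l.foldl pvStepB (chars, gaps, cnt)).2.1.length = (l.foldl pvStepB (chars, gaps, cnt)).1.length ∧
    l.foldl pvStepA (pvRender chars gaps, cnt, (chars.length : Int)) =
      (pvRender (l.foldl pvStepB (chars, gaps, cnt)).1 (l.foldl pvStepB (chars, gaps, cnt)).2.1,
       (l.foldl pvStepB (chars, gaps, cnt)).2.2,
       ((l.foldl pvStepB (chars, gaps, cnt)).1.length : Int)) := by
  induction l with
  | nil => intro chars gaps cnt h; exact ⟨h, rfl⟩
  | cons c l ih =>
    intro chars gaps cnt h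
    by_cases hc : c = 'V'
    · simpa [pvStepA, pvStepB, hc] using ih chars gaps (cnt + 1) h
    · have hlen : ((chars ++ [c]).length : Int) = (chars.length : Int) + 1 := by
        simp
      have := ih (chars ++ [c]) (gaps ++ [cnt]) 0 (by simp [h])
      simpa [pvStepA, pvStepB, hc, pvRender_append chars gaps c cnt h, hlen] using this

-- ===== VERDICT (by name: the statement is the Claim_ definition above) =====
theorem remove_vyanjana_spec : Claim_equal_remove_vyanjana := by
  intro s _
  unfold Spec_remove_vyanjana remove_vyanjana remove_vyanjana_alt
  have h := (pvLoop s.toList [] [] 0 rfl).2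
  rw [show pvRender [] [] = ([] : List Char) from rfl] at h
  rw [show (([] : List Char).length : Int) = 0 from rfl] at h
  rw [h]
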